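-- pv_equiv track=rewrite | github.com/devbyte1328/volcano-nvim | rplugin/python3/molten/__init__.py | _find_cell_regions
-- ===== SOURCE A (Python) =====
-- from typing import Any, Dict, List, Optional, Tuple
--
-- def _find_cell_regions(buf_lines: List[str]) -> List[Tuple[int, int]]:
--     """
--     Return [(start_line, end_line)] for every <cell>...</cell> in the buffer.
--     Lines are 0-based and inclusive of both tags.
--     """
--     i = 0
--     regions = []
--     n = len(buf_lines)
--     while i < n:
--         if buf_lines[i].strip() == "<cell>":
--             start = i
--             i += 1
--             while i < n and buf_lines[i].strip() != "</cell>":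
--                 i += 1
--             if i < n and buf_lines[i].strip() == "</cell>":
--                 regions.append((start, i))
--         i += 1
--     return regions
-- ===== SOURCE B (Python) =====
-- from typing import List, Tuple
--
-- def _find_cell_regions(buf_lines: List[str]) -> List[Tuple[int, int]]:
--     """
--     Return [(start_line, end_line)] for every <cell>...</cell> in the buffer.
--     Lines are 0-based and inclusive of both tags.
--
--     Strategy: first extract the (sorted) index lists of open and close tag
--     lines, then pair them: each region is the first remaining open together
--     with the first close after it; opens inside the region are skipped.
--     """
--     stripped = [line.strip() for line in buf_lines]
--     opens = [i for i, s in enumerate(stripped) if s == "<cell>"]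
--     closes = [i for i, s in enumerate(stripped) if s == "</cell>"]
--     regions = []
--     while opens and closes:
--         o = opens[0]
--         closes = [c for c in closes if c > o]
--         if not closes:
--             break
--         c = closes[0]
--         regions.append((o, c))
--         opens = [x for x in opens if x > c]
--         closes = closes[1:]
--     return regions
-- ===== Notes on version B (the rewrite author's own statement) =====
-- stated objective: alternative
-- what changed: Instead of A's nested index-jumping scan over the buffer, B first extracts the sorted index lists of '<cell>' and '</cell>' lines with two comprehensions and then pairs the two lists by repeated filtering (first open, first close after it, drop opens up to that close).
import Mathlib
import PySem

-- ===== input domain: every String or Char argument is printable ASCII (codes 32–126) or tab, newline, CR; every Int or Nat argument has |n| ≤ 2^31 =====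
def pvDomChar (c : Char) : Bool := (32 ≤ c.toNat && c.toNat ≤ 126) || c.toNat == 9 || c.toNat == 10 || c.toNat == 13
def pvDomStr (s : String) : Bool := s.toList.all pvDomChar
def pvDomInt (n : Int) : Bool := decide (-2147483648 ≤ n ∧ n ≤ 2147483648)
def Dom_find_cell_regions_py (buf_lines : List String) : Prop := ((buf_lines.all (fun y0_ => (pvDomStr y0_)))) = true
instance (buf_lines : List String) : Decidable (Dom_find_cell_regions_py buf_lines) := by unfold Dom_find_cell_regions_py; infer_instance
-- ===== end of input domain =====

-- B replaces A's nested index-jumping scan by a staged algorithm: extract the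
-- index lists of open/close tag lines, then pair the two lists by repeated
-- filtering. Alternative decomposition, same return value.


-- ===== PORT A =====
-- inner 'while i < n and buf_lines[i].strip() != "</cell>": i += 1'
def findCloseA (buf : List String) (n : Nat) (i : Nat) : Nat :=
  if h : i < n ∧ PySem.Str.strip (buf.getD i "") ≠ "</cell>" then
    findCloseA buf n (i + 1)
  else i
termination_by n - i
decreasing_by omega

-- the inner loop never moves the index backwards (used for loopA's termination)
theorem findCloseA_ge (buf : List String) (n i : Nat) : i ≤ findCloseA buf n i := by
  unfold findCloseA
  split
  · have := findCloseA_ge buf n (i + 1); omega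
  · exact le_refl i
termination_by n - i
decreasing_by omega

-- outer 'while i < n: …'
def loopA (buf : List String) (n : Nat) (i : Nat) (regions : List (Int × Int)) :
    List (Int × Int) :=
  if h : i < n then
    if PySem.Str.strip (buf.getD i "") = "<cell>" then
      let start := i
      let j := findCloseA buf n (i + 1)
      let regions' :=
        if j < n ∧ PySem.Str.strip (buf.getD j "") = "</cell>" then
          regions ++ [((start : Int), (j : Int))]
        else regions
      loopA buf n (j + 1) regions'
    else
      loopA buf n (i + 1) regions
  else regions
termination_by n - i
decreasing_by
  · have := findCloseA_ge buf n (i + 1); omega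
  · omega

def find_cell_regions_py (buf_lines : List String) : List (Int × Int) :=
  loopA buf_lines buf_lines.length 0 []

-- ===== PORT B =====
-- 'while opens and closes: …' of Source B: pair the two index lists by filtering.
-- The fuel argument is only a structural totality guard: each loop iteration
-- consumes at least one close, so fuel = closes.length never runs out.
def pairLoop : Nat → List Int → List Int → List (Int × Int) → List (Int × Int)
  | fuel + 1, o :: os, c0 :: cs, regions =>
    match (c0 :: cs).filter (fun c => decide (o < c)) with
    | [] => regions
    | c :: cs' => pairLoop fuel ((o :: os).filter (fun x => decide (c < x))) cs' (regions ++ [(o, c)])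
  | _, _, _, regions => regions

def find_cell_regions_py_alt (buf_lines : List String) : List (Int × Int) :=
  let stripped := buf_lines.map PySem.Str.strip
  let opens := ((PySem.List.enumerate stripped 0).filter (fun p => p.2 == "<cell>")).map Prod.fst
  let closes := ((PySem.List.enumerate stripped 0).filter (fun p => p.2 == "</cell>")).map Prod.fst
  pairLoop closes.length opens closes []

-- ===== PRECONDITION & SPEC =====
def Spec_find_cell_regions_py (buf_lines : List String) (out : List (Int × Int)) : Prop := out = find_cell_regions_py_alt buf_lines
instance (buf_lines : List String) (out : List (Int × Int)) : Decidable (Spec_find_cell_regions_py buf_lines out) := by unfold Spec_find_cell_regions_py; infer_instance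

-- ===== CLAIM (what is proved, stated in full; the proofs are below) =====
def Claim_equal_find_cell_regions_py : Prop := ∀ (buf_lines : List String), Dom_find_cell_regions_py buf_lines → Spec_find_cell_regions_py buf_lines (find_cell_regions_py buf_lines)

-- ===== LEMMAS AND PROOFS =====

-- indices j ∈ [i, buf.length) whose stripped line equals tag
def idxFrom (buf : List String) (tag : String) (i : Nat) : List Nat :=
  if h : i < buf.length then
    if PySem.Str.strip (buf.getD i "") = tag then i :: idxFrom buf tag (i + 1)
    else idxFrom buf tag (i + 1)
  else []
termination_by buf.length - i
decreasing_by all_goals omega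

theorem idxFrom_stop (buf : List String) (tag : String) (i : Nat) (h : ¬ i < buf.length) :
    idxFrom buf tag i = [] := by rw [idxFrom, dif_neg h]

theorem idxFrom_hit (buf : List String) (tag : String) (i : Nat) (h : i < buf.length)
    (ht : PySem.Str.strip (buf.getD i "") = tag) :
    idxFrom buf tag i = i :: idxFrom buf tag (i + 1) := by
  rw [idxFrom, dif_pos h, if_pos ht]

theorem idxFrom_miss (buf : List String) (tag : String) (i : Nat) (h : i < buf.length)
    (ht : ¬ PySem.Str.strip (buf.getD i "") = tag) :
    idxFrom buf tag i = idxFrom buf tag (i + 1) := by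
  rw [idxFrom, dif_pos h, if_neg ht]

-- L1: every index in idxFrom lies in [i, length)
theorem idxFrom_mem (buf : List String) (tag : String) (i : Nat) :
    ∀ x ∈ idxFrom buf tag i, i ≤ x ∧ x < buf.length := by
  intro x hx
  rw [idxFrom] at hx
  split at hx
  · rename_i h
    split at hx
    · rcases List.mem_cons.mp hx with rfl | hx'
      · exact ⟨le_refl _, h⟩
      · have := idxFrom_mem buf tag (i + 1) x hx'; omega
    · have := idxFrom_mem buf tag (i + 1) x hx; omega
  · simp at hx
termination_by buf.length - i
decreasing_by all_goals omega

-- L2: the tail of a nonempty idxFrom restarts after its head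
theorem idxFrom_cons (buf : List String) (tag : String) (i : Nat) (c : Nat) (rest : List Nat)
    (h : idxFrom buf tag i = c :: rest) :
    rest = idxFrom buf tag (c + 1) ∧ i ≤ c ∧ c < buf.length ∧
      PySem.Str.strip (buf.getD c "") = tag := by
  rw [idxFrom] at h
  split at h
  · rename_i hlt
    split at h
    · rename_i ht
      obtain ⟨hc, hr⟩ := List.cons_eq_cons.mp h
      subst hc
      exact ⟨hr.symm, le_refl _, hlt, ht⟩
    · have := idxFrom_cons buf tag (i + 1) c rest h
      exact ⟨this.1, by omega, this.2.2⟩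
  · simp at h
termination_by buf.length - i
decreasing_by all_goals omega

-- L3a: no close from k on → A's inner scan runs to the end
theorem findClose_none (buf : List String) (k : Nat) (hk : k ≤ buf.length)
    (h : idxFrom buf "</cell>" k = []) : findCloseA buf buf.length k = buf.length := by
  by_cases hlt : k < buf.length
  · by_cases ht : PySem.Str.strip (buf.getD k "") = "</cell>"
    · rw [idxFrom_hit buf _ k hlt ht] at h; cases h
    · rw [idxFrom_miss buf _ k hlt ht] at h
      rw [findCloseA, dif_pos ⟨hlt, ht⟩]
      exact findClose_none buf (k + 1) (by omega) h
  · rw [findCloseA, dif_neg (fun hx => hlt hx.1)]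
    omega
termination_by buf.length - k
decreasing_by omega

-- L3b: first close from k on → A's inner scan stops exactly there
theorem findClose_some (buf : List String) (k : Nat) (c : Nat) (rest : List Nat)
    (h : idxFrom buf "</cell>" k = c :: rest) : findCloseA buf buf.length k = c := by
  by_cases hlt : k < buf.length
  · by_cases ht : PySem.Str.strip (buf.getD k "") = "</cell>"
    · rw [idxFrom_hit buf _ k hlt ht] at h
      rw [findCloseA, dif_neg (fun hx => hx.2 ht)]
      exact (List.cons_eq_cons.mp h).1
    · rw [findCloseA, dif_pos ⟨hlt, ht⟩]
      exact findClose_some buf (k + 1) c rest (by rwa [idxFrom_miss buf _ k hlt ht] at h)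
  · rw [idxFrom_stop buf _ k hlt] at h; cases h
termination_by buf.length - k
decreasing_by omega

-- L4: filtering "> c" from idxFrom k (k ≤ c+1) restarts the list at c+1
theorem idxFrom_filter_gt (buf : List String) (tag : String) (c : Nat) (k : Nat)
    (hk : k ≤ c + 1) :
    (idxFrom buf tag k).filter (fun x => decide (c < x)) = idxFrom buf tag (c + 1) := by
  by_cases hke : k = c + 1
  · subst hke
    apply List.filter_eq_self.mpr
    intro x hx
    have := idxFrom_mem buf tag (c + 1) x hx
    simp; omega
  · have hkc : k ≤ c := by omega
    by_cases hlt : k < buf.length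
    · by_cases ht : PySem.Str.strip (buf.getD k "") = tag
      · rw [idxFrom_hit buf tag k hlt ht, List.filter_cons]
        have : (decide (c < k)) = false := by simp; omega
        rw [this]
        simp only [Bool.false_eq_true, if_false]
        exact idxFrom_filter_gt buf tag c (k + 1) (by omega)
      · rw [idxFrom_miss buf tag k hlt ht]
        exact idxFrom_filter_gt buf tag c (k + 1) (by omega)
    · rw [idxFrom_stop buf tag k hlt, idxFrom_stop buf tag (c + 1) (by omega)]
      rfl
termination_by buf.length - k
decreasing_by all_goals omega

-- cast bridge: filtering the Int image = image of the Nat filter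
theorem filter_gt_map_cast (l : List Nat) (c : Nat) :
    (l.map (Nat.cast : Nat → Int)).filter (fun x => decide ((c : Int) < x)) =
      (l.filter (fun x => decide (c < x))).map (Nat.cast : Nat → Int) := by
  rw [List.filter_map]
  congr 1
  apply List.filter_congr
  intro x _
  simp

-- pairLoop's while-guard: an empty list on either side stops at once
theorem pairLoop_closes_nil (fuel : Nat) (a : List Int) (r : List (Int × Int)) :
    pairLoop fuel a [] r = r := by
  cases fuel <;> cases a <;> rfl

theorem pairLoop_opens_nil (fuel : Nat) (a : List Int) (r : List (Int × Int)) :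
    pairLoop fuel [] a r = r := by
  cases fuel <;> cases a <;> rfl

-- any fuel of at least closes.length computes the same value
theorem pairLoop_fuel (f1 : Nat) : ∀ (f2 : Nat) (opens closes : List Int)
    (r : List (Int × Int)), closes.length ≤ f1 → closes.length ≤ f2 →
    pairLoop f1 opens closes r = pairLoop f2 opens closes r := by
  induction f1 with
  | zero =>
    intro f2 opens closes r h1 h2
    have : closes = [] := List.length_eq_zero_iff.mp (by omega)
    subst this
    rw [pairLoop_closes_nil, pairLoop_closes_nil]
  | succ f1' ih =>
    intro f2 opens closes r h1 h2
    cases closes with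
    | nil => rw [pairLoop_closes_nil, pairLoop_closes_nil]
    | cons c0 cs =>
      cases f2 with
      | zero => simp at h2
      | succ f2' =>
        cases opens with
        | nil => rw [pairLoop_opens_nil, pairLoop_opens_nil]
        | cons o os =>
          rw [pairLoop, pairLoop]
          cases hft : (c0 :: cs).filter (fun c => decide (o < c)) with
          | nil => rfl
          | cons c cs' =>
            have hlen := List.length_filter_le (fun c => decide (o < c)) (c0 :: cs)
            rw [hft] at hlen
            simp only [List.length_cons] at hlen h1 h2
            exact ih f2' _ cs' _ (by omega) (by omega)

-- a close tag below the first open is discarded by pairLoop's filter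
theorem pairLoop_drop_close (f : Nat) (o : Int) (os : List Int) (c0 : Int) (cl : List Int)
    (r : List (Int × Int)) (h : ¬ o < c0) (hf : cl.length ≤ f) :
    pairLoop (f + 1) (o :: os) (c0 :: cl) r = pairLoop f (o :: os) cl r := by
  rw [pairLoop]
  have hflt : (c0 :: cl).filter (fun c => decide (o < c)) =
      cl.filter (fun c => decide (o < c)) := by
    simp [h]
  rw [hflt]
  cases hft : cl.filter (fun c => decide (o < c)) with
  | nil =>
    cases cl with
    | nil => rw [pairLoop_closes_nil]
    | cons c1 cs1 =>
      cases f with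
      | zero => simp at hf
      | succ f' =>
        rw [pairLoop, hft]
  | cons c cs' =>
    cases cl with
    | nil => cases hft
    | cons c1 cs1 =>
      cases f with
      | zero => simp at hf
      | succ f' =>
        rw [pairLoop, hft]
        have hlen := List.length_filter_le (fun c => decide (o < c)) (c1 :: cs1)
        rw [hft] at hlen
        simp only [List.length_cons] at hlen hf
        exact pairLoop_fuel (f' + 1) f' _ cs' _ (by omega) (by omega)

-- MAIN INVARIANT: A's outer loop from i = B's pairing of the tag-index suffixes
theorem mainInv (buf : List String) (fuel : Nat) :
    ∀ i regions, i ≤ buf.length → buf.length - i ≤ fuel →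
    loopA buf buf.length i regions =
      pairLoop (idxFrom buf "</cell>" i).length
        ((idxFrom buf "<cell>" i).map (Nat.cast : Nat → Int))
        ((idxFrom buf "</cell>" i).map (Nat.cast : Nat → Int)) regions := by
  induction fuel with
  | zero =>
    intro i regions hi hf
    have hien : ¬ i < buf.length := by omega
    rw [loopA, dif_neg hien, idxFrom_stop buf _ i hien, idxFrom_stop buf _ i hien]
    simp [pairLoop_closes_nil]
  | succ m ih =>
    intro i regions hi hf
    by_cases hin : i < buf.length
    · by_cases hopen : PySem.Str.strip (buf.getD i "") = "<cell>"
      · -- open tag at i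
        have hnc : ¬ PySem.Str.strip (buf.getD i "") = "</cell>" := by
          rw [hopen]; decide
        rw [idxFrom_hit buf _ i hin hopen, idxFrom_miss buf _ i hin hnc]
        rw [loopA, dif_pos hin, if_pos hopen]
        dsimp only
        cases hcl : idxFrom buf "</cell>" (i + 1) with
        | nil =>
          have hj : findCloseA buf buf.length (i + 1) = buf.length :=
            findClose_none buf (i + 1) (by omega) hcl
          rw [hj]
          have hcond : ¬ (buf.length < buf.length ∧
              PySem.Str.strip (buf.getD buf.length "") = "</cell>") := by
            intro hx; omega
          rw [if_neg hcond, loopA, dif_neg (by omega)]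
          simp [pairLoop_closes_nil]
        | cons c rest =>
          obtain ⟨hrest, hic, hcn, hct⟩ := idxFrom_cons buf _ (i + 1) c rest hcl
          have hj : findCloseA buf buf.length (i + 1) = c :=
            findClose_some buf (i + 1) c rest hcl
          rw [hj, if_pos ⟨hcn, hct⟩]
          -- B side: unfold pairLoop once
          have hfid : ((c : Int) :: rest.map (Nat.cast : Nat → Int)).filter
              (fun x => decide ((i : Int) < x)) =
              (c : Int) :: rest.map (Nat.cast : Nat → Int) := by
            have hx : ((c : Int) :: rest.map (Nat.cast : Nat → Int)) =
                (idxFrom buf "</cell>" (i + 1)).map (Nat.cast : Nat → Int) := by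
              rw [hcl, List.map_cons]
            rw [hx]
            apply List.filter_eq_self.mpr
            intro x hxm
            obtain ⟨y, hy, rfl⟩ := List.mem_map.mp hxm
            have := idxFrom_mem buf _ (i + 1) y hy
            simp; omega
          have hfo : (((i : Nat) : Int) :: (idxFrom buf "<cell>" (i + 1)).map
                (Nat.cast : Nat → Int)).filter (fun x => decide ((c : Int) < x)) =
              (idxFrom buf "<cell>" (c + 1)).map (Nat.cast : Nat → Int) := by
            rw [List.filter_cons]
            have hci : (decide ((c : Int) < ((i : Nat) : Int))) = false := by
              simp; exact_mod_cast (by omega : ((i : Nat) : Int) ≤ (c : Int))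
            rw [hci]
            simp only [Bool.false_eq_true, if_false]
            rw [filter_gt_map_cast, idxFrom_filter_gt buf _ c (i + 1) (by omega)]
          rw [List.map_cons, List.map_cons, List.length_cons, pairLoop]
          split
          · rename_i h1
            rw [hfid] at h1
            cases h1
          · rename_i c2 cs2 h1
            rw [hfid] at h1
            obtain ⟨rfl, rfl⟩ := List.cons_eq_cons.mp h1
            rw [hfo, hrest]
            exact ih (c + 1) (regions ++ [((i : Int), (c : Int))]) (by omega) (by omega)
      · -- not an open tag
        rw [loopA, dif_pos hin, if_neg hopen, idxFrom_miss buf "<cell>" i hin hopen]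
        by_cases hclose : PySem.Str.strip (buf.getD i "") = "</cell>"
        · rw [idxFrom_hit buf _ i hin hclose, List.map_cons]
          rw [ih (i + 1) regions (by omega) (by omega)]
          cases hop : idxFrom buf "<cell>" (i + 1) with
          | nil => simp [pairLoop_opens_nil]
          | cons o os =>
            obtain ⟨_, hio, _, _⟩ := idxFrom_cons buf _ (i + 1) o os hop
            rw [List.map_cons, List.length_cons, pairLoop_drop_close]
            · simp only [not_lt]
              exact_mod_cast (by omega : i ≤ o)
            · simp
        · rw [idxFrom_miss buf "</cell>" i hin hclose]
          exact ih (i + 1) regions (by omega) (by omega)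
    · rw [loopA, dif_neg hin, idxFrom_stop buf _ i hin, idxFrom_stop buf _ i hin]
      simp [pairLoop_closes_nil]

-- B's comprehension over enumerate(stripped) builds exactly idxFrom 0
theorem enumFilter_eq_idxFrom (buf : List String) (tag : String) (fuel : Nat) :
    ∀ i, i ≤ buf.length → buf.length - i ≤ fuel →
    ((((PySem.List.pyRange (i : Int) (buf.length : Int) 1).map
        (fun j => (j, PySem.List.pyGetD (buf.map PySem.Str.strip) j ""))).filter
        (fun p => p.2 == tag)).map Prod.fst) =
      (idxFrom buf tag i).map (Nat.cast : Nat → Int) := by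
  induction fuel with
  | zero =>
    intro i hi hf
    have hie : i = buf.length := by omega
    subst hie
    rw [idxFrom_stop buf tag buf.length (by omega)]
    rw [show PySem.List.pyRange (buf.length : Int) (buf.length : Int) 1 = [] by
      simp [PySem.List.pyRange]]
    rfl
  | succ m ih =>
    intro i hi hf
    by_cases hin : i < buf.length
    · rw [PySem.List.pyRange_one_cons (by exact_mod_cast hin)]
      rw [List.map_cons, List.filter_cons]
      have hget : PySem.List.pyGetD (buf.map PySem.Str.strip) ((i : Nat) : Int) "" =
          PySem.Str.strip (buf.getD i "") := by
        rw [PySem.List.pyGetD_natCast]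
        simp [List.getD_eq_getElem?_getD, hin]
      have hcast : ((i : Int) + 1) = (((i + 1 : Nat)) : Int) := by push_cast; ring
      by_cases ht : PySem.Str.strip (buf.getD i "") = tag
      · rw [idxFrom_hit buf tag i hin ht, List.map_cons]
        have hb : ((( i : Int), PySem.List.pyGetD (buf.map PySem.Str.strip) (i : Int) "").2
            == tag) = true := by
          simp only [hget]
          simp [List.getD_eq_getElem?_getD] at ht
          simp [ht]
        rw [hb, if_pos rfl, List.map_cons, hcast]
        exact congrArg _ (ih (i + 1) (by omega) (by omega))
      · rw [idxFrom_miss buf tag i hin ht]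
        have hb : ((( i : Int), PySem.List.pyGetD (buf.map PySem.Str.strip) (i : Int) "").2
            == tag) = false := by
          simp only [hget]
          simp [List.getD_eq_getElem?_getD] at ht
          simp [ht]
        rw [hb]
        simp only [Bool.false_eq_true, if_false]
        rw [hcast]
        exact ih (i + 1) (by omega) (by omega)
    · have hie : i = buf.length := by omega
      subst hie
      rw [idxFrom_stop buf tag buf.length (by omega)]
      rw [show PySem.List.pyRange (buf.length : Int) (buf.length : Int) 1 = [] by
        simp [PySem.List.pyRange]]
      rfl

-- ===== VERDICT (by name: the statement is the Claim_ definition above) =====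
theorem find_cell_regions_py_spec : Claim_equal_find_cell_regions_py := by
  intro buf _
  unfold Spec_find_cell_regions_py find_cell_regions_py find_cell_regions_py_alt
  dsimp only
  rw [PySem.List.enumerate_eq_map_pyRange (d := "")]
  have hlen : PySem.List.len (buf.map PySem.Str.strip) = (buf.length : Int) := by
    simp [PySem.List.len_eq]
  rw [hlen]
  have h1 := enumFilter_eq_idxFrom buf "<cell>" buf.length 0 (by omega) (by omega)
  have h2 := enumFilter_eq_idxFrom buf "</cell>" buf.length 0 (by omega) (by omega)
  rw [Nat.cast_zero] at h1 h2
  rw [h1, h2, List.length_map]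
  exact mainInv buf buf.length 0 [] (by omega) (by omega)
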